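-- pv_equiv track=rewrite | github.com/everybitco/font_compress | font_compress.py | decompress_and_verify
-- ===== SOURCE A (Python) =====
-- def decompress_and_verify(compressed, original_size):
--     result = []
--     i = 0
--     while i < len(compressed):
--         if compressed[i] == 0x00:
--             if i + 1 < len(compressed):
--                 count = compressed[i + 1]
--                 result.extend([0x00] * count)
--                 i += 2
--             else:
--                 result.append(0x00)
--                 i += 1
--         else:
--             result.append(compressed[i])
--             i += 1
--
--     # Unpack bits
--     unpacked = []
--     for byte in result:
--         for bit in range(8):
--             unpacked.append(0xFF if (byte & (1 << (7 - bit))) else 0x00)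
--
--     return unpacked[:original_size]
-- ===== SOURCE B (Python) =====
-- def decompress_and_verify(compressed, original_size):
--     # Fused single pass: RLE-decode and bit-unpack together, never building the
--     # intermediate byte list; runs of zero bytes expand directly to 8*count zeros.
--     out = []
--     n = len(compressed)
--     i = 0
--     while i < n:
--         b = compressed[i]
--         if b == 0x00 and i + 1 < n:
--             out.extend([0x00] * (8 * compressed[i + 1]))
--             i += 2
--         else:
--             for bit in range(8):
--                 out.append(0xFF if (b & (1 << (7 - bit))) else 0x00)
--             i += 1
--     return out[:original_size]
-- ===== Notes on version B (the rewrite author's own statement) =====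
-- stated objective: simpler
-- what changed: Replaced A's two sequential passes (RLE-decode into an intermediate byte list, then per-bit unpacking of every byte) with a single fused loop that never builds the intermediate list and expands each zero-run directly to 8*count zero output bytes instead of bit-testing them.
import Mathlib
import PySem

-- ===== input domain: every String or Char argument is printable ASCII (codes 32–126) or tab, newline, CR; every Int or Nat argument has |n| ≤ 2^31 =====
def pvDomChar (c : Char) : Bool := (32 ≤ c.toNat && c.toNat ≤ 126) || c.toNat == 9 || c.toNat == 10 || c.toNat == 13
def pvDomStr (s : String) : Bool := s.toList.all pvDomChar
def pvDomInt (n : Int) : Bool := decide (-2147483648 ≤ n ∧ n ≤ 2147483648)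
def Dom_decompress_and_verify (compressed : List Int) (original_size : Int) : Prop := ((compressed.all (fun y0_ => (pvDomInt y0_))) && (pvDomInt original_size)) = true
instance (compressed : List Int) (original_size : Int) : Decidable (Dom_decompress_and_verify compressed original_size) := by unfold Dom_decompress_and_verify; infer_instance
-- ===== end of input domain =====

-- B fuses A's two passes (RLE-decode, then bit-unpack) into one pass that expands a
-- zero-run directly to 8*count zero bytes; objective: simpler (no intermediate list), not claimed faster.

-- ===== PORT A =====
-- the while-loop building `result` (i advances by 2 after a 0x00 with a successor, else by 1);
-- [0x00]*count with negative count is empty, matched by Int.toNat clamping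
def pvRleA : List Int → List Int
  | [] => []
  | c :: rest =>
    if c = 0 then
      match rest with
      | n :: rest' => List.replicate n.toNat 0 ++ pvRleA rest'
      | [] => [0]
    else c :: pvRleA rest

-- inner `for bit in range(8)` loop; (2:Int)^(7-bit).toNat is exactly Python's 1 << (7-bit) since 0 ≤ bit ≤ 7
def pvUnpackByteA (b : Int) : List Int :=
  (PySem.List.pyRange 0 8 1).map (fun bit => if Int.land b ((2 : Int) ^ (7 - bit).toNat) ≠ 0 then 0xFF else 0x00)

def decompress_and_verify (compressed : List Int) (original_size : Int) : List Int :=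
  PySem.List.slice ((pvRleA compressed).flatMap pvUnpackByteA) none (some original_size)

-- ===== PORT B =====
-- same bit test as Source B's literal-byte loop
def pvUnpack8B (b : Int) : List Int :=
  (PySem.List.pyRange 0 8 1).map (fun bit => if Int.land b ((2 : Int) ^ (7 - bit).toNat) ≠ 0 then 0xFF else 0x00)

-- Source B's single fused while-loop: zero-with-successor emits 8*count zeros at once, otherwise unpack the byte
def pvFusedB : List Int → List Int
  | [] => []
  | [c] => pvUnpack8B c
  | c :: n :: rest =>
    if c = 0 then List.replicate (8 * n).toNat 0 ++ pvFusedB rest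
    else pvUnpack8B c ++ pvFusedB (n :: rest)

def decompress_and_verify_alt (compressed : List Int) (original_size : Int) : List Int :=
  PySem.List.slice (pvFusedB compressed) none (some original_size)

-- ===== PRECONDITION & SPEC =====
def Spec_decompress_and_verify (compressed : List Int) (original_size : Int) (out : List Int) : Prop := out = decompress_and_verify_alt compressed original_size
instance (compressed : List Int) (original_size : Int) (out : List Int) : Decidable (Spec_decompress_and_verify compressed original_size out) := by unfold Spec_decompress_and_verify; infer_instance

-- ===== CLAIM (what is proved, stated in full; the proofs are below) =====
def Claim_equal_decompress_and_verify : Prop := ∀ (compressed : List Int) (original_size : Int), Dom_decompress_and_verify compressed original_size → Spec_decompress_and_verify compressed original_size (decompress_and_verify compressed original_size)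

-- ===== LEMMAS AND PROOFS =====
theorem pvUnpackByteA_zero : pvUnpackByteA 0 = List.replicate 8 0 := by decide

theorem flatMap_unpack_replicate_zero (m : Nat) :
    (List.replicate m (0 : Int)).flatMap pvUnpackByteA = List.replicate (8 * m) 0 := by
  induction m with
  | zero => rfl
  | succ k ih =>
    rw [List.replicate_succ, List.flatMap_cons, ih, pvUnpackByteA_zero]
    rw [show 8 * (k + 1) = 8 + 8 * k by ring, List.replicate_add]

theorem fused_eq (l : List Int) : pvFusedB l = (pvRleA l).flatMap pvUnpackByteA := by
  induction l using pvFusedB.induct with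
  | case1 => rfl
  | case2 c =>
    by_cases hc : c = 0 <;>
      simp [pvFusedB, pvRleA, pvUnpack8B, pvUnpackByteA, hc]
  | case3 n rest ih =>
    have hn : (8 * n).toNat = 8 * n.toNat := by omega
    simp [pvFusedB, pvRleA, hn, flatMap_unpack_replicate_zero, ih]
  | case4 c n rest hc ih =>
    simp [pvFusedB, pvRleA, hc, ih, pvUnpack8B, pvUnpackByteA]

-- ===== VERDICT (by name: the statement is the Claim_ definition above) =====
theorem decompress_and_verify_spec : Claim_equal_decompress_and_verify := by
  intro compressed original_size _
  unfold Spec_decompress_and_verify decompress_and_verify decompress_and_verify_alt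
  rw [fused_eq]
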